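-- pv_equiv track=rewrite | github.com/perrymanuk/radbot | radbot/tools/alertmanager/processor.py | _extract_action_summary
-- ===== SOURCE A (Python) =====
-- def _extract_action_summary(response: str) -> str:
--     """Extract a brief action summary from the agent's response."""
--     # Take first 200 chars as a rough summary
--     if not response:
--         return "No response from agent"
--     lines = response.strip().splitlines()
--     # Try to find a summary line
--     for line in lines:
--         lower = line.lower()
--         if any(kw in lower for kw in ("restarted", "updated", "fixed", "cloned", "pushed", "changed")):
--             return line.strip()[:200]
--     # Fall back to first non-empty line
--     for line in lines:
--         if line.strip():
--             return line.strip()[:200]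
--     return response[:200]
-- ===== SOURCE B (Python) =====
-- _KEYWORDS = ("restarted", "updated", "fixed", "cloned", "pushed", "changed")
--
--
-- def _extract_action_summary(response: str) -> str:
--     """Extract a brief action summary from the agent's response (single pass)."""
--     if not response:
--         return "No response from agent"
--     fallback = None
--     for line in response.strip().splitlines():
--         if any(kw in line.lower() for kw in _KEYWORDS):
--             return line.strip()[:200]
--         if fallback is None and line.strip():
--             fallback = line
--     if fallback is not None:
--         return fallback.strip()[:200]
--     return response[:200]
-- ===== Notes on version B (the rewrite author's own statement) =====
-- stated objective: alternative
-- what changed: Replaces A's two sequential scans of the line list (one for a keyword line, one for the first non-empty line) by a single pass that returns on the first keyword line and carries the first non-empty line as a fallback accumulator.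
import Mathlib
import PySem

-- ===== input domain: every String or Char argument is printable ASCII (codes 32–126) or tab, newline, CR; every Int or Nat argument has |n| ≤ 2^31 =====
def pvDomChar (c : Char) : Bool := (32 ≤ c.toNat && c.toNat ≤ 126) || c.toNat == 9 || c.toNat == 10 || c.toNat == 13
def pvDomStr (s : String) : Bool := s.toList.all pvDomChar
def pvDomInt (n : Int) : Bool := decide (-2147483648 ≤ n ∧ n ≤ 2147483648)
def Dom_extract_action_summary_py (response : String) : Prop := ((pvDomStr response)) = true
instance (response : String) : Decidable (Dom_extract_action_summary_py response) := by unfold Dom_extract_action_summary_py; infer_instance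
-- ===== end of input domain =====

-- B replaces A's two sequential scans of the lines by a single pass carrying the
-- first non-empty line as a fallback accumulator (objective: alternative; same cost).

-- the keyword tuple shared by both Python versions (pure data)
def pvKw : List String := ["restarted", "updated", "fixed", "cloned", "pushed", "changed"]

-- ===== PORT A =====
-- first loop of A: first line whose lowercase form contains a keyword
def pvFindKw : List String → Option String
  | [] => none
  | l :: rest =>
    if pvKw.any (fun kw => PySem.Str.isIn kw (PySem.Str.lower l)) then some l
    else pvFindKw rest

-- second loop of A: first line with truthy (non-empty) strip
def pvFindNE : List String → Option String
  | [] => none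
  | l :: rest =>
    if PySem.Str.strip l ≠ "" then some l
    else pvFindNE rest

def extract_action_summary_py (response : String) : String :=
  if response = "" then "No response from agent"
  else
    let lines := PySem.Str.splitlines (PySem.Str.strip response)
    match pvFindKw lines with
    | some l => PySem.Str.slice (PySem.Str.strip l) none (some 200)
    | none =>
      match pvFindNE lines with
      | some l => PySem.Str.slice (PySem.Str.strip l) none (some 200)
      | none => PySem.Str.slice response none (some 200)

-- ===== PORT B =====
-- B's single loop: return on a keyword line, else remember the first non-empty line
def pvLoopB (response : String) : List String → Option String → String
  | [], fb =>
    match fb with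
    | some f => PySem.Str.slice (PySem.Str.strip f) none (some 200)
    | none => PySem.Str.slice response none (some 200)
  | l :: rest, fb =>
    if pvKw.any (fun kw => PySem.Str.isIn kw (PySem.Str.lower l)) then
      PySem.Str.slice (PySem.Str.strip l) none (some 200)
    else
      pvLoopB response rest (if fb = none ∧ PySem.Str.strip l ≠ "" then some l else fb)

def extract_action_summary_py_alt (response : String) : String :=
  if response = "" then "No response from agent"
  else pvLoopB response (PySem.Str.splitlines (PySem.Str.strip response)) none

-- ===== PRECONDITION & SPEC =====
def Spec_extract_action_summary_py (response : String) (out : String) : Prop := out = extract_action_summary_py_alt response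
instance (response : String) (out : String) : Decidable (Spec_extract_action_summary_py response out) := by unfold Spec_extract_action_summary_py; infer_instance

-- ===== CLAIM (what is proved, stated in full; the proofs are below) =====
def Claim_equal_extract_action_summary_py : Prop := ∀ (response : String), Dom_extract_action_summary_py response → Spec_extract_action_summary_py response (extract_action_summary_py response)

-- ===== LEMMAS AND PROOFS =====

-- loop invariant of B's single pass: it computes A's keyword scan, falling back
-- to the stored accumulator, and only then to A's non-empty scan
lemma pvLoopB_eq (r : String) (ls : List String) (fb : Option String) :
    pvLoopB r ls fb =
      match pvFindKw ls with
      | some l => PySem.Str.slice (PySem.Str.strip l) none (some 200)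
      | none =>
        match fb with
        | some f => PySem.Str.slice (PySem.Str.strip f) none (some 200)
        | none =>
          match pvFindNE ls with
          | some l => PySem.Str.slice (PySem.Str.strip l) none (some 200)
          | none => PySem.Str.slice r none (some 200) := by
  induction ls generalizing fb with
  | nil => cases fb <;> rfl
  | cons l rest ih =>
    simp only [pvLoopB, pvFindKw, pvFindNE]
    by_cases hkw : (pvKw.any fun kw => PySem.Str.isIn kw (PySem.Str.lower l)) = true
    · rw [if_pos hkw, if_pos hkw]
    · rw [if_neg hkw, if_neg hkw, ih]
      by_cases hne : PySem.Str.strip l = "" <;>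
        cases fb <;>
        cases pvFindKw rest <;>
        simp [hne]

-- ===== VERDICT (by name: the statement is the Claim_ definition above) =====
theorem extract_action_summary_py_spec : Claim_equal_extract_action_summary_py := by
  intro response _
  unfold Spec_extract_action_summary_py extract_action_summary_py extract_action_summary_py_alt
  by_cases hr : response = ""
  · rw [if_pos hr, if_pos hr]
  · rw [if_neg hr, if_neg hr, pvLoopB_eq]
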